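-- pv_equiv track=rewrite | github.com/heyoeyo/adventofcode-2022 | day08/solution8.py | get_max_map_leftright
-- ===== SOURCE A (Python) =====
-- def get_max_map_leftright(matrix, left_to_right = True):
--
--     # Flip the matrix if needed
--     check_matrix = matrix
--     if not left_to_right:
--         check_matrix = [list(reversed(each_row)) for each_row in check_matrix]
--
--     # Check for max-values going left-to-right (we flip the matrix to handle other direction)
--     max_map = []
--     for row_idx, each_row in enumerate(check_matrix):
--
--         new_max_row = []
--         for col_idx, cell_value in enumerate(each_row):
--
--             new_max = -1
--             left_col_idx = (col_idx - 1)
--             if left_col_idx >= 0: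
--                 prev_max = new_max_row[left_col_idx]
--                 prev_cell = each_row[left_col_idx]
--                 new_max = max(prev_cell, prev_max)
--
--             new_max_row.append(new_max)
--         max_map.append(new_max_row)
--
--     # Un-flip our results if needed
--     if not left_to_right:
--         max_map = [list(reversed(each_row)) for each_row in max_map]
--
--     return max_map
-- ===== SOURCE B (Python) =====
-- def get_max_map_leftright(matrix, left_to_right = True):
--     # B: divide-and-conquer prefix scan: map the left half recursively, map the
--     # right half recursively, then lift every right-half entry by the left
--     # half's maximum; same -1 sentinel and row reversals as A.
--     def scan(row):
--         n = len(row)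
--         if n <= 1:
--             return [-1] * n
--         mid = n // 2
--         left = row[:mid]
--         right_scan = scan(row[mid:])
--         m = max(left)
--         return scan(left) + [max(m, v) for v in right_scan]
--     rows = matrix if left_to_right else [list(reversed(r)) for r in matrix]
--     result = [scan(r) for r in rows]
--     return result if left_to_right else [list(reversed(r)) for r in result]
-- ===== Notes on version B (the rewrite author's own statement) =====
-- stated objective: alternative
-- what changed: Replaces A's single left-to-right pass with back-indexing by a divide-and-conquer prefix scan: each half's exclusive-max row is computed recursively and the right half is lifted by the left half's maximum.
import Mathlib
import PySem

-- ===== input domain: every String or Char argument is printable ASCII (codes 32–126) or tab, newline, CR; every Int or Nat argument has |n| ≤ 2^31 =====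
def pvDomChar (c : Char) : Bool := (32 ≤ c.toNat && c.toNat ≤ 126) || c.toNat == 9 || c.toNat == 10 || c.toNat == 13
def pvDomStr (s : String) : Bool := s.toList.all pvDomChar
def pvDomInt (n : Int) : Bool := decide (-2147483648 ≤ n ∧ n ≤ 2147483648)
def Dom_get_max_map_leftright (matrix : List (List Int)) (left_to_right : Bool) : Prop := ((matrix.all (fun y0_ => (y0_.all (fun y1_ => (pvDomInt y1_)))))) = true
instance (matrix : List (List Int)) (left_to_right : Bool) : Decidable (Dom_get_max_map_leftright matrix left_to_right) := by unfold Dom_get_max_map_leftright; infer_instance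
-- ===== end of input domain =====

-- B replaces A's single back-indexing pass by a divide-and-conquer prefix scan
-- (objective: alternative).

-- ===== PORT A =====
-- inner loop: for col_idx, cell_value in enumerate(each_row), appending to new_max_row
def pvRowAGo (each_row : List Int) (col_idx : Nat) (new_max_row : List Int) :
    List Int → List Int
  | [] => new_max_row
  | _cell_value :: rest =>
      let left_col_idx : Int := (col_idx : Int) - 1
      let new_max : Int :=
        if left_col_idx ≥ 0 then
          -- both indexes are always in range (left_col_idx < col_idx = new_max_row.length)
          let prev_max := (PySem.List.pyGet? new_max_row left_col_idx).getD 0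
          let prev_cell := (PySem.List.pyGet? each_row left_col_idx).getD 0
          max prev_cell prev_max
        else -1
      pvRowAGo each_row (col_idx + 1) (new_max_row ++ [new_max]) rest

def pvRowA (each_row : List Int) : List Int := pvRowAGo each_row 0 [] each_row

def get_max_map_leftright (matrix : List (List Int)) (left_to_right : Bool) : List (List Int) :=
  let check_matrix := if ¬ left_to_right then matrix.map (fun each_row => each_row.reverse) else matrix
  -- outer loop appends one max-row per row
  let max_map := check_matrix.foldl (fun max_map each_row => max_map ++ [pvRowA each_row]) []
  if ¬ left_to_right then max_map.map (fun each_row => each_row.reverse) else max_map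

-- ===== PORT B =====
-- scan(row): divide and conquer; row[:mid] = take mid, row[mid:] = drop mid (exact,
-- mid is a nonnegative in-range index); max(left) via PySem.List.max? (left is nonempty here)
def pvScanDCF (fuel : Nat) (row : List Int) : List Int :=
  match fuel with
  | 0 => []  -- never reached: fuel starts at row.length and halves keep shrinking
  | fuel + 1 =>
    if row.length ≤ 1 then List.replicate row.length (-1)
    else
      let mid := row.length / 2
      let left := row.take mid
      let right_scan := pvScanDCF fuel (row.drop mid)
      let m := (PySem.List.max? left (fun y => y)).getD (-1)
      pvScanDCF fuel left ++ right_scan.map (fun v => max m v)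

def pvScanDC (row : List Int) : List Int := pvScanDCF row.length row

def get_max_map_leftright_alt (matrix : List (List Int)) (left_to_right : Bool) : List (List Int) :=
  let rows := if left_to_right then matrix else matrix.map (fun r => r.reverse)
  let result := rows.map (fun r => pvScanDC r)
  if left_to_right then result else result.map (fun r => r.reverse)

-- ===== PRECONDITION & SPEC =====
def Spec_get_max_map_leftright (matrix : List (List Int)) (left_to_right : Bool) (out : List (List Int)) : Prop := out = get_max_map_leftright_alt matrix left_to_right
instance (matrix : List (List Int)) (left_to_right : Bool) (out : List (List Int)) : Decidable (Spec_get_max_map_leftright matrix left_to_right out) := by unfold Spec_get_max_map_leftright; infer_instance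

-- ===== CLAIM (what is proved, stated in full; the proofs are below) =====
def Claim_equal_get_max_map_leftright : Prop := ∀ (matrix : List (List Int)) (left_to_right : Bool), Dom_get_max_map_leftright matrix left_to_right → Spec_get_max_map_leftright matrix left_to_right (get_max_map_leftright matrix left_to_right)

-- ===== LEMMAS AND PROOFS =====

-- Reference exclusive-prefix-max scan: both ports are proved equal to it.
def pvScan (running : Int) : List Int → List Int
  | [] => []
  | value :: rest => running :: pvScan (max running value) rest

def pvRunMax (r : Int) (xs : List Int) : Int := xs.foldl max r

theorem pvScan_length (r : Int) (xs : List Int) : (pvScan r xs).length = xs.length := by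
  induction xs generalizing r with
  | nil => rfl
  | cons x t ih => simp [pvScan, ih]

theorem pvScan_snoc (r : Int) (xs : List Int) (x : Int) :
    pvScan r (xs ++ [x]) = pvScan r xs ++ [pvRunMax r xs] := by
  induction xs generalizing r with
  | nil => rfl
  | cons y t ih => simp [pvScan, ih, pvRunMax]

theorem pvScan_append (r : Int) (xs ys : List Int) :
    pvScan r (xs ++ ys) = pvScan r xs ++ pvScan (pvRunMax r xs) ys := by
  induction xs generalizing r with
  | nil => simp [pvScan, pvRunMax]
  | cons x t ih => simp [pvScan, ih, pvRunMax]

theorem pvScan_map_max (m r : Int) (ys : List Int) :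
    (pvScan r ys).map (fun v => max m v) = pvScan (max m r) ys := by
  induction ys generalizing r with
  | nil => rfl
  | cons y t ih =>
    simp only [pvScan, List.map_cons, ih]
    rw [max_assoc]

-- A's inner loop computes the reference scan
theorem pvRowAGo_eq (row : List Int) :
    ∀ (t : List Int) (k : Nat), k ≤ row.length → t = row.drop k →
      pvRowAGo row k (pvScan (-1) (row.take k)) t
        = pvScan (-1) (row.take k) ++ pvScan (pvRunMax (-1) (row.take k)) t := by
  intro t
  induction t with
  | nil => intro k _ _; simp [pvRowAGo, pvScan]
  | cons v rest ih =>
    intro k hk ht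
    have hklt : k < row.length := by
      by_contra h
      have hnil : row.drop k = [] := List.drop_eq_nil_of_le (by omega)
      rw [hnil] at ht; exact List.cons_ne_nil _ _ ht
    have hdk := List.drop_eq_getElem_cons hklt
    rw [hdk] at ht
    have hpair := List.cons_eq_cons.mp ht
    have hv : row[k] = v := hpair.1.symm
    have hrest : rest = row.drop (k + 1) := hpair.2
    have htake : row.take (k + 1) = row.take k ++ [v] := by
      rw [List.take_add_one]
      simp [List.getElem?_eq_getElem hklt, hv]
    have hrun : pvRunMax (-1) (row.take (k+1)) = max (pvRunMax (-1) (row.take k)) v := by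
      rw [htake]; simp [pvRunMax]
    -- evaluate one step of A's loop
    have hnew : pvRowAGo row k (pvScan (-1) (row.take k)) (v :: rest)
        = pvRowAGo row (k+1) (pvScan (-1) (row.take k) ++ [pvRunMax (-1) (row.take k)]) rest := by
      show pvRowAGo row (k+1) (pvScan (-1) (row.take k) ++ [_]) rest
         = pvRowAGo row (k+1) (pvScan (-1) (row.take k) ++ [pvRunMax (-1) (row.take k)]) rest
      congr 2
      by_cases hk0 : k = 0
      · subst hk0; simp [pvRunMax]
      · obtain ⟨j, rfl⟩ : ∃ j, k = j + 1 := ⟨k - 1, by omega⟩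
        have hcast : ((j + 1 : Nat) : Int) - 1 = ((j : Nat) : Int) := by push_cast; ring
        have hge : ((j + 1 : Nat) : Int) - 1 ≥ 0 := by omega
        rw [if_pos hge, hcast]
        have hjlt : j < row.length := by omega
        have htake' : row.take (j + 1) = row.take j ++ [row[j]] := by
          rw [List.take_add_one]
          simp [List.getElem?_eq_getElem hjlt]
        have hlen : (pvScan (-1 : Int) (row.take j)).length = j := by
          rw [pvScan_length, List.length_take]; omega
        have hprevmax : (PySem.List.pyGet? (pvScan (-1) (row.take (j+1))) ((j : Nat) : Int)).getD 0
            = pvRunMax (-1) (row.take j) := by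
          rw [htake', pvScan_snoc, PySem.List.pyGet?_natCast]
          rw [List.getElem?_append_right (by omega)]
          simp [hlen]
        have hprevcell : (PySem.List.pyGet? row ((j : Nat) : Int)).getD 0 = row[j] := by
          rw [PySem.List.pyGet?_natCast, List.getElem?_eq_getElem hjlt]
          rfl
        rw [hprevmax, hprevcell]
        have hstep : pvRunMax (-1) (row.take (j+1)) = max (pvRunMax (-1) (row.take j)) row[j] := by
          rw [htake']
          simp only [pvRunMax, List.foldl_append, List.foldl_cons, List.foldl_nil]
        rw [hstep, max_comm]
    rw [hnew, ← pvScan_snoc, ← htake]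
    rw [ih (k+1) (by omega) hrest]
    rw [hrun, htake, pvScan_snoc]
    simp [pvScan]

theorem pvRowA_eq (row : List Int) : pvRowA row = pvScan (-1) row := by
  have := pvRowAGo_eq row row 0 (by omega) (by simp)
  simpa [pvRowA, pvScan, pvRunMax] using this

theorem pvFoldl_max_out (xs : List Int) (a b : Int) :
    xs.foldl max (max a b) = max a (xs.foldl max b) := by
  induction xs generalizing b with
  | nil => rfl
  | cons y s ih => simp only [List.foldl_cons, max_assoc, ih]

-- B's divide-and-conquer scan computes the reference scan
theorem pvScanDCF_eq (fuel : Nat) : ∀ row : List Int, row.length ≤ fuel →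
    pvScanDCF fuel row = pvScan (-1) row := by
  induction fuel with
  | zero =>
    intro row h
    have : row = [] := List.eq_nil_of_length_eq_zero (by omega)
    subst this; rfl
  | succ fuel ih =>
    intro row hf
    rw [pvScanDCF]
    by_cases h1 : row.length ≤ 1
    · rw [if_pos h1]
      match row, h1 with
      | [], _ => rfl
      | [x], _ => simp [pvScan]
    · rw [if_neg h1]
      have hmidlt : row.length / 2 < row.length := by omega
      have hmidpos : 1 ≤ row.length / 2 := by omega
      have hltake : (row.take (row.length / 2)).length = row.length / 2 := by
        simp; omega
      show pvScanDCF fuel (row.take (row.length / 2)) ++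
          (pvScanDCF fuel (row.drop (row.length / 2))).map
            (fun v => max ((PySem.List.max? (row.take (row.length / 2)) (fun y => y)).getD (-1)) v)
        = pvScan (-1) row
      rw [ih _ (by rw [hltake]; omega), ih _ (by simp; omega)]
      -- the left half is nonempty, so max(left) is its running max
      obtain ⟨x, t, hx⟩ : ∃ x t, row.take (row.length / 2) = x :: t := by
        cases hc : row.take (row.length / 2) with
        | nil => rw [hc] at hltake; simp at hltake; omega
        | cons x t => exact ⟨x, t, rfl⟩
      have hmax : (PySem.List.max? (row.take (row.length / 2)) (fun y => y)).getD (-1)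
          = t.foldl max x := by
        rw [hx, PySem.List.max?_id_cons]; rfl
      rw [hmax, pvScan_map_max]
      have hcomb : max (t.foldl max x) (-1) = pvRunMax (-1) (row.take (row.length / 2)) := by
        simp only [pvRunMax, hx, List.foldl_cons]
        rw [pvFoldl_max_out, max_comm]
      rw [hcomb, ← pvScan_append, List.take_append_drop]

theorem pvScanDC_eq (row : List Int) : pvScanDC row = pvScan (-1) row :=
  pvScanDCF_eq row.length row (le_refl _)

theorem pvFoldl_append_eq_map (f : List Int → List Int) (rows : List (List Int)) (acc : List (List Int)) :
    rows.foldl (fun mm r => mm ++ [f r]) acc = acc ++ rows.map f := by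
  induction rows generalizing acc with
  | nil => simp
  | cons r t ih => simp [List.foldl, ih]

-- ===== VERDICT (by name: the statement is the Claim_ definition above) =====
theorem get_max_map_leftright_spec : Claim_equal_get_max_map_leftright := by
  intro matrix left_to_right _
  unfold Spec_get_max_map_leftright get_max_map_leftright get_max_map_leftright_alt
  cases left_to_right <;>
    simp only [Bool.false_eq_true, not_false_iff, if_true, if_false] <;>
    rw [pvFoldl_append_eq_map] <;>
    simp [pvRowA_eq, pvRowA_eq, pvScanDC_eq]
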